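-- pv_equiv track=rewrite | github.com/ProphetSunboy/python_tasks | reverse_letters_then_special_characters_in_a_string.py | reverseByType
-- ===== SOURCE A (Python) =====
-- def reverseByType(s: str) -> str:
--     """
--     Given a string `s` consisting of lowercase English letters and special
--     characters, perform the following in order:
--
--     1. Reverse the lowercase letters and place them back into the positions
--     originally occupied by letters.
--     2. Reverse the special characters and place them back into the positions
--     originally occupied by special characters.
--
--     Return the resulting string after performing these reversals.
--
--     Args:
--         s (str): Input string consisting of lowercase letters and special
--         characters.
--
--     Returns:
--         str: The transformed string with letters and special characters
--         reversed within their respective positions.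
--
--     Example:
--         Input: s = "a,b$c"
--         Output: "c$b,a"
--
--     Time Complexity: O(n), where n is the length of the string.
--     Space Complexity: O(n), for storing the letters and special characters.
--
--     LeetCode: Beats 100% of submissions
--     """
--     letters = []
--     special = []
--
--     for ch in s:
--         if ch.isalpha():
--             letters.append(ch)
--         else:
--             special.append(ch)
--
--     res = ""
--     for ch in s:
--         if ch.isalpha():
--             res += letters.pop()
--         else:
--             res += special.pop()
--
--     return res
-- ===== SOURCE B (Python) =====
-- def reverseByType(s: str) -> str:
--     arr = list(s)
--     for pred in (str.isalpha, lambda c: not c.isalpha()):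
--         i, j = 0, len(arr) - 1
--         while i < j:
--             if not pred(arr[i]):
--                 i += 1
--             elif not pred(arr[j]):
--                 j -= 1
--             else:
--                 arr[i], arr[j] = arr[j], arr[i]
--                 i += 1
--                 j -= 1
--     return ''.join(arr)
-- ===== Notes on version B (the rewrite author's own statement) =====
-- stated objective: alternative
-- what changed: A collects letters and specials into two auxiliary lists and rebuilds the string by popping from them; B reverses the string in place with two bidirectional two-pointer swap passes (letters first, then specials) and joins once.
import Mathlib
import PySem

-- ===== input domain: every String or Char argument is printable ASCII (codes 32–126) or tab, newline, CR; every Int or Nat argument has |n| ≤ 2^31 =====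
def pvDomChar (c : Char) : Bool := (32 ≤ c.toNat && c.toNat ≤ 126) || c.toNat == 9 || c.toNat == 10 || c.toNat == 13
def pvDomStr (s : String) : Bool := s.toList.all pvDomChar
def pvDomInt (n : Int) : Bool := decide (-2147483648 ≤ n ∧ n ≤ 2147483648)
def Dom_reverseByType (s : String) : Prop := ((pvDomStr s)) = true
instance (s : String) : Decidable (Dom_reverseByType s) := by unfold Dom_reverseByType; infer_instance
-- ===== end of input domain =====

-- B replaces A's collect-into-two-lists-then-pop rebuild by two in-place two-pointer swap passes
-- (letters first, then specials), a different algorithm of the same O(n) cost (objective: alternative).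

-- ===== PORT A =====
-- A: first loop collects letters and specials into two lists; second loop rebuilds the
-- string, popping from the END of the matching list at each position.
def reverseByType (s : String) : String :=
  let cs := s.toList
  let coll := cs.foldl (fun (acc : List Char × List Char) ch =>
    if PySem.Chars.isalpha ch then (acc.1 ++ [ch], acc.2) else (acc.1, acc.2 ++ [ch]))
    ([], [])
  let fin := cs.foldl (fun (st : List Char × List Char × List Char) ch =>
    if PySem.Chars.isalpha ch then
      match PySem.List.pop? st.2.1 (-1) with
      | some (x, l') => (st.1 ++ [x], l', st.2.2)
      | none => (st.1, st.2.1, st.2.2)   -- unreachable: pop() is called once per collected element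
    else
      match PySem.List.pop? st.2.2 (-1) with
      | some (x, sp') => (st.1 ++ [x], st.2.1, sp')
      | none => (st.1, st.2.1, st.2.2))  -- unreachable
    ([], coll.1, coll.2)
  String.ofList fin.1

-- ===== PORT B =====
-- one two-pointer pass: skip non-pred chars from both ends, swap pred chars, move inward.
-- Indices are always in range (0 ≤ i < j ≤ len-1 inside the loop), so getD is exact for arr[i].
def tpSwap (pred : Char → Bool) (arr : List Char) (i j : Nat) : List Char :=
  if i < j then
    if ¬ pred (arr.getD i ' ') then tpSwap pred arr (i + 1) j
    else if ¬ pred (arr.getD j ' ') then tpSwap pred arr i (j - 1)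
    else tpSwap pred ((arr.set i (arr.getD j ' ')).set j (arr.getD i ' ')) (i + 1) (j - 1)
  else arr
termination_by j - i
decreasing_by all_goals omega

def reverseByType_alt (s : String) : String :=
  let arr0 := s.toList
  let arr1 := tpSwap (fun c => PySem.Chars.isalpha c) arr0 (0) (arr0.length - 1)
  let arr2 := tpSwap (fun c => !PySem.Chars.isalpha c) arr1 (0) (arr1.length - 1)
  String.ofList arr2

-- ===== PRECONDITION & SPEC =====
def Spec_reverseByType (s : String) (out : String) : Prop := out = reverseByType_alt s
instance (s : String) (out : String) : Decidable (Spec_reverseByType s out) := by unfold Spec_reverseByType; infer_instance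

-- ===== CLAIM (what is proved, stated in full; the proofs are below) =====
def Claim_equal_reverseByType : Prop := ∀ (s : String), Dom_reverseByType s → Spec_reverseByType s (reverseByType s)

-- ===== LEMMAS AND PROOFS =====

-- `mk2 p cs q`: rebuild cs, keeping non-p chars and consuming q at p positions
-- (fallback: keep the original char when q is exhausted — never reached in our uses).
def mk2 (p : Char → Bool) : List Char → List Char → List Char
  | [], _ => []
  | c :: t, q =>
    if p c then
      match q with
      | x :: xq => x :: mk2 p t xq
      | [] => c :: mk2 p t []
    else c :: mk2 p t q

-- reverse the p-chars of l within their positions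
def revW (p : Char → Bool) (l : List Char) : List Char := mk2 p l ((l.filter p).reverse)

-- `mtwo p cs q1 q2`: rebuild cs consuming q1 at p positions and q2 at non-p positions (A's merge shape).
def mtwo (p : Char → Bool) : List Char → List Char → List Char → List Char
  | [], _, _ => []
  | c :: t, q1, q2 =>
    if p c then
      match q1 with
      | x :: xq => x :: mtwo p t xq q2
      | [] => c :: mtwo p t [] q2
    else
      match q2 with
      | y :: yq => y :: mtwo p t q1 yq
      | [] => c :: mtwo p t q1 []

theorem length_mk2 (p : Char → Bool) (cs q : List Char) : (mk2 p cs q).length = cs.length := by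
  induction cs generalizing q with
  | nil => rfl
  | cons c t ih =>
    cases hp : p c
    · simp [mk2, hp, ih]
    · cases q <;> simp [mk2, hp, ih]

theorem mk2_cons_neg (p : Char → Bool) (c : Char) (t q : List Char) (h : p c = false) :
    mk2 p (c :: t) q = c :: mk2 p t q := by
  simp [mk2, h]

theorem revW_cons_neg (p : Char → Bool) (c : Char) (t : List Char) (h : p c = false) :
    revW p (c :: t) = c :: revW p t := by
  unfold revW
  rw [List.filter_cons_of_neg (by simp [h]), mk2_cons_neg p c t _ h]

theorem revW_singleton (p : Char → Bool) (c : Char) : revW p [c] = [c] := by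
  cases hp : p c <;> simp [revW, mk2, hp]

-- append a non-p char on the right
theorem mk2_append_neg (p : Char → Bool) (c : Char) (t q : List Char) (h : p c = false)
    (hq : q.length ≤ t.countP p) : mk2 p (t ++ [c]) q = mk2 p t q ++ [c] := by
  induction t generalizing q with
  | nil =>
    simp only [List.countP_nil, Nat.le_zero, List.length_eq_zero_iff] at hq
    subst hq
    simp [mk2, h]
  | cons d t' ih =>
    cases hp : p d
    · rw [List.cons_append, mk2_cons_neg p d _ _ hp, mk2_cons_neg p d _ _ hp, ih q, List.cons_append]
      simpa [List.countP_cons, hp] using hq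
    · cases q with
      | nil =>
        simp only [List.cons_append, mk2, hp, if_true]
        rw [ih [] (by simp)]
      | cons x xq =>
        simp only [List.cons_append, mk2, hp, if_true]
        rw [ih xq (by simpa [List.countP_cons, hp] using hq)]

theorem revW_append_neg (p : Char → Bool) (c : Char) (t : List Char) (h : p c = false) :
    revW p (t ++ [c]) = revW p t ++ [c] := by
  unfold revW
  rw [List.filter_append]
  simp only [List.filter_cons, h, List.filter_nil, Bool.false_eq_true, if_false, List.append_nil]
  exact mk2_append_neg p c t _ h (by simp [List.countP_eq_length_filter])

-- move a p char from each end to the other (swap shape)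
theorem mk2_swap_aux (p : Char → Bool) (a b : Char) (hb : p b = true) :
    ∀ (m q : List Char), q.length = m.countP p → mk2 p (m ++ [b]) (q ++ [a]) = mk2 p m q ++ [a] := by
  intro m
  induction m with
  | nil =>
    intro q hq
    simp only [List.countP_nil, List.length_eq_zero_iff] at hq
    subst hq
    simp [mk2, hb]
  | cons d m' ih =>
    intro q hq
    cases hp : p d
    · rw [List.cons_append, mk2_cons_neg p d _ _ hp, mk2_cons_neg p d _ _ hp, ih q, List.cons_append]
      simpa [List.countP_cons, hp] using hq
    · cases q with
      | nil => simp [hp] at hq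
      | cons x xq =>
        simp only [List.cons_append, mk2, hp, if_true]
        rw [ih xq (by simpa [List.countP_cons, hp] using hq)]

theorem revW_swap (p : Char → Bool) (a b : Char) (m : List Char) (ha : p a = true) (hb : p b = true) :
    revW p (a :: m ++ [b]) = b :: revW p m ++ [a] := by
  unfold revW
  have hf : (a :: m ++ [b]).filter p = a :: m.filter p ++ [b] := by
    simp [List.filter_append, ha, hb]
  rw [hf]
  simp only [List.reverse_append, List.reverse_cons, List.reverse_nil, List.nil_append,
    List.cons_append]
  show mk2 p (a :: (m ++ [b])) (b :: ((m.filter p).reverse ++ [a])) = b :: (mk2 p m ((m.filter p).reverse) ++ [a])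
  simp only [mk2, ha, if_true]
  rw [mk2_swap_aux p a b hb m _ (by simp [List.countP_eq_length_filter])]

-- set at the exact boundary of an append
theorem set_boundary (xs : List Char) (y w : Char) :
    ∀ (zs : List Char), (xs ++ y :: zs).set xs.length w = xs ++ w :: zs := by
  induction xs with
  | nil => intro zs; rfl
  | cons x xs ih => intro zs; simp [ih]

-- the window representation when the loop has stopped
theorem window_id (p : Char → Bool) (arr : List Char) (i j : Nat)
    (hij : j ≤ i) (hi : i ≤ j + 1) (hj : j < arr.length) :
    arr = arr.take i ++ revW p ((arr.drop i).take (j + 1 - i)) ++ arr.drop (j + 1) := by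
  rcases Nat.eq_or_lt_of_le hi with h1 | h1
  · subst h1
    simp [revW, mk2]
  · have hij' : i = j := by omega
    subst hij'
    have : i + 1 - i = 1 := by omega
    rw [this, List.drop_eq_getElem_cons hj, List.take_succ_cons, List.take_zero,
      revW_singleton, List.append_assoc, List.singleton_append,
      ← List.drop_eq_getElem_cons hj, List.take_append_drop]

-- two-pointer pass = reverse-within-positions on the window
theorem tpSwap_repr (p : Char → Bool) :
    ∀ (n : Nat) (arr : List Char) (i j : Nat), j - i ≤ n → j < arr.length → i ≤ j + 1 →
      tpSwap p arr i j = arr.take i ++ revW p ((arr.drop i).take (j + 1 - i)) ++ arr.drop (j + 1) := by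
  intro n
  induction n with
  | zero =>
    intro arr i j hn hj hij
    rw [tpSwap, if_neg (by omega)]
    exact window_id p arr i j (by omega) hij hj
  | succ n ih =>
    intro arr i j hn hj hij
    rw [tpSwap]
    by_cases hlt : i < j
    case neg =>
      rw [if_neg hlt]
      exact window_id p arr i j (by omega) hij hj
    rw [if_pos hlt]
    have hi : i < arr.length := by omega
    rw [List.getD_eq_getElem arr ' ' hi, List.getD_eq_getElem arr ' ' hj]
    by_cases hpi : p arr[i] = true
    case neg =>
      -- skip a non-letter on the left
      have hpi' : p arr[i] = false := by simpa using hpi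
      rw [if_pos hpi, ih arr (i + 1) j (by omega) hj (by omega)]
      have hmid : (arr.drop i).take (j + 1 - i) = arr[i] :: (arr.drop (i + 1)).take (j + 1 - (i + 1)) := by
        rw [List.drop_eq_getElem_cons hi, show j + 1 - i = (j + 1 - (i + 1)) + 1 by omega,
          List.take_succ_cons]
      rw [hmid, revW_cons_neg p _ _ hpi', List.take_succ_eq_append_getElem hi]
      simp only [List.append_assoc, List.cons_append, List.nil_append]
    rw [if_neg (by simpa using hpi)]
    by_cases hpj : p arr[j] = true
    case neg =>
      -- skip a non-letter on the right
      have hpj' : p arr[j] = false := by simpa using hpj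
      rw [if_pos hpj, ih arr i (j - 1) (by omega) (by omega) (by omega)]
      have hdd : ((arr.drop i).drop (j - i)) = arr.drop j := by
        rw [List.drop_drop, show i + (j - i) = j by omega]
      have hmid : (arr.drop i).take (j + 1 - i)
          = (arr.drop i).take (j - i) ++ [arr[j]] := by
        rw [show j + 1 - i = (j - i) + 1 by omega, List.take_add, hdd,
          List.drop_eq_getElem_cons hj, List.take_succ_cons, List.take_zero]
      rw [hmid, revW_append_neg p _ _ hpj', show j - 1 + 1 = j by omega,
        List.drop_eq_getElem_cons hj]
      simp
    -- swap case
    rw [if_neg (by simpa using hpj)]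
    have hpj' : p arr[j] = true := by simpa using hpj
    have hpi' : p arr[i] = true := by simpa using hpi
    set a := arr[i] with ha
    set b := arr[j] with hb
    set A1 := arr.take i with hA1
    set M := (arr.drop (i + 1)).take (j - (i + 1)) with hM
    set D := arr.drop (j + 1) with hD
    have hlenA1 : A1.length = i := by simp [hA1]; omega
    have hlenM : M.length = j - (i + 1) := by simp [hM]; omega
    have hdrop1 : arr.drop (i + 1) = M ++ b :: D := by
      conv_lhs => rw [← List.take_append_drop (j - (i + 1)) (arr.drop (i + 1))]
      rw [List.drop_drop, show i + 1 + (j - (i + 1)) = j by omega,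
        List.drop_eq_getElem_cons hj, ← hb, ← hM, ← hD]
    have harr' : (arr.set i b).set j a = (A1 ++ b :: M) ++ a :: D := by
      have h1 : arr.set i b = (A1 ++ b :: M) ++ b :: D := by
        rw [List.set_eq_take_cons_drop b hi, hdrop1, ← hA1]
        simp
      rw [h1, show j = (A1 ++ b :: M).length by simp [hlenA1, hlenM]; omega, set_boundary]
    rw [harr', ih ((A1 ++ b :: M) ++ a :: D) (i + 1) (j - 1) (by omega)
      (by simp [hlenA1, hlenM, hD]; omega) (by omega)]
    have ht1 : ((A1 ++ b :: M) ++ a :: D).take (i + 1) = A1 ++ [b] := by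
      rw [show (A1 ++ b :: M) ++ a :: D = (A1 ++ [b]) ++ (M ++ a :: D) by simp,
        show i + 1 = (A1 ++ [b]).length by simp [hlenA1], List.take_left]
    have hd1 : ((A1 ++ b :: M) ++ a :: D).drop (i + 1) = M ++ a :: D := by
      rw [show (A1 ++ b :: M) ++ a :: D = (A1 ++ [b]) ++ (M ++ a :: D) by simp,
        show i + 1 = (A1 ++ [b]).length by simp [hlenA1], List.drop_left]
    have ht2 : (M ++ a :: D).take (j - 1 + 1 - (i + 1)) = M := by
      rw [show j - 1 + 1 - (i + 1) = M.length by omega, List.take_left]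
    have hd2 : ((A1 ++ b :: M) ++ a :: D).drop (j - 1 + 1) = a :: D := by
      rw [show j - 1 + 1 = ((A1 ++ b :: M)).length by simp [hlenA1, hlenM]; omega, List.drop_left]
    rw [ht1, hd1, ht2, hd2]
    have hmid : (arr.drop i).take (j + 1 - i) = a :: (M ++ [b]) := by
      rw [List.drop_eq_getElem_cons hi, ← ha,
        show j + 1 - i = (j - (i + 1) + 1) + 1 by omega, List.take_succ_cons, hdrop1,
        show j - (i + 1) + 1 = M.length + 1 by omega, List.take_length_add_append,
        List.take_succ_cons, List.take_zero]
    rw [hmid, show a :: (M ++ [b]) = a :: M ++ [b] by simp, revW_swap p a b M hpi' hpj']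
    simp


theorem tpSwap_whole (p : Char → Bool) (arr : List Char) (h : arr ≠ []) :
    tpSwap p arr 0 (arr.length - 1) = revW p arr := by
  have hlen : 0 < arr.length := List.length_pos_of_ne_nil h
  rw [tpSwap_repr p arr.length arr 0 (arr.length - 1) (by omega) (by omega) (by omega)]
  rw [show arr.length - 1 + 1 - 0 = arr.length by omega, show arr.length - 1 + 1 = arr.length by omega]
  simp

-- A's first loop collects the two filters
theorem collect_eq (cs : List Char) (a b : List Char) :
    cs.foldl (fun (acc : List Char × List Char) ch =>
      if PySem.Chars.isalpha ch then (acc.1 ++ [ch], acc.2) else (acc.1, acc.2 ++ [ch])) (a, b)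
    = (a ++ cs.filter PySem.Chars.isalpha, b ++ cs.filter (fun c => !PySem.Chars.isalpha c)) := by
  induction cs generalizing a b with
  | nil => simp
  | cons c t ih =>
    cases hp : PySem.Chars.isalpha c <;>
      simp [List.foldl_cons, hp, ih]

-- A's second loop is mtwo on the reversed lists
theorem rebuild_eq (cs : List Char) :
    ∀ (a l sp : List Char), cs.countP PySem.Chars.isalpha ≤ l.length →
      cs.countP (fun c => !PySem.Chars.isalpha c) ≤ sp.length →
      (cs.foldl (fun (st : List Char × List Char × List Char) ch =>
        if PySem.Chars.isalpha ch then
          match PySem.List.pop? st.2.1 (-1) with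
          | some (x, l') => (st.1 ++ [x], l', st.2.2)
          | none => (st.1, st.2.1, st.2.2)
        else
          match PySem.List.pop? st.2.2 (-1) with
          | some (x, sp') => (st.1 ++ [x], st.2.1, sp')
          | none => (st.1, st.2.1, st.2.2)) (a, l, sp)).1
      = a ++ mtwo PySem.Chars.isalpha cs l.reverse sp.reverse := by
  induction cs with
  | nil => intro a l sp _ _; simp [mtwo]
  | cons c t ih =>
    intro a l sp hl hsp
    cases hp : PySem.Chars.isalpha c
    · have hne : sp ≠ [] := by
        intro h; subst h; simp [hp] at hsp
      obtain ⟨x, sp', hx⟩ : ∃ x sp', sp = sp' ++ [x] :=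
        ⟨sp.getLast hne, sp.dropLast, (List.dropLast_concat_getLast hne).symm⟩
      subst hx
      rw [List.foldl_cons]
      simp only [hp, Bool.false_eq_true, if_false, PySem.List.pop?_last]
      rw [ih (a ++ [x]) l sp' (by simpa [List.countP_cons, hp] using hl)
        (by simpa [List.countP_cons, hp] using hsp)]
      simp [mtwo, hp, List.reverse_append]
    · have hne : l ≠ [] := by
        intro h; subst h; simp [hp] at hl
      obtain ⟨x, l', hx⟩ : ∃ x l', l = l' ++ [x] :=
        ⟨l.getLast hne, l.dropLast, (List.dropLast_concat_getLast hne).symm⟩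
      subst hx
      rw [List.foldl_cons]
      simp only [hp, if_true, PySem.List.pop?_last]
      rw [ih (a ++ [x]) l' sp (by simpa [List.countP_cons, hp] using hl)
        (by simpa [List.countP_cons, hp] using hsp)]
      simp [mtwo, hp, List.reverse_append]

-- merging p-chars at p positions leaves the non-p filter unchanged
theorem filter_neg_mk2 (p : Char → Bool) :
    ∀ (cs q : List Char), (∀ x ∈ q, p x = true) →
      (mk2 p cs q).filter (fun c => !p c) = cs.filter (fun c => !p c) := by
  intro cs
  induction cs with
  | nil => intro q _; rfl
  | cons c t ih =>
    intro q hq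
    cases hp : p c
    · rw [mk2_cons_neg p c t q hp]
      simp [hp, ih q hq]
    · cases q with
      | nil => simp [mk2, hp, ih [] (by simp)]
      | cons x xq =>
        have hx : p x = true := hq x (by simp)
        simp [mk2, hp, hx, ih xq (fun y hy => hq y (by simp [hy]))]

-- composing the two passes gives A's two-list merge
theorem mk2_mk2_eq_mtwo (p : Char → Bool) :
    ∀ (cs q1 q2 : List Char), (∀ x ∈ q1, p x = true) →
      mk2 (fun c => !p c) (mk2 p cs q1) q2 = mtwo p cs q1 q2 := by
  intro cs
  induction cs with
  | nil => intro q1 q2 _; rfl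
  | cons c t ih =>
    intro q1 q2 hq1
    cases hp : p c
    · rw [mk2_cons_neg p c t q1 hp]
      cases q2 with
      | nil => simp [mk2, mtwo, hp, ih q1 [] hq1]
      | cons y yq => simp [mk2, mtwo, hp, ih q1 yq hq1]
    · cases q1 with
      | nil => simp [mk2, mtwo, hp, ih [] q2 (by simp)]
      | cons x xq =>
        have hx : p x = true := hq1 x (by simp)
        simp [mk2, mtwo, hp, hx, ih xq q2 (fun y hy => hq1 y (by simp [hy]))]

theorem portA_eq (s : String) :
    reverseByType s = String.ofList (mtwo PySem.Chars.isalpha s.toList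
      ((s.toList.filter PySem.Chars.isalpha).reverse)
      ((s.toList.filter (fun c => !PySem.Chars.isalpha c)).reverse)) := by
  simp only [reverseByType]
  rw [collect_eq]
  simp only [List.nil_append]
  rw [rebuild_eq s.toList [] _ _ (by simp [List.countP_eq_length_filter])
    (by simp [List.countP_eq_length_filter])]
  simp

theorem portB_eq (s : String) :
    reverseByType_alt s = String.ofList (mtwo PySem.Chars.isalpha s.toList
      ((s.toList.filter PySem.Chars.isalpha).reverse)
      ((s.toList.filter (fun c => !PySem.Chars.isalpha c)).reverse)) := by
  simp only [reverseByType_alt]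
  by_cases hcs : s.toList = []
  · rw [hcs]
    simp [tpSwap, mtwo]
  · rw [tpSwap_whole _ _ hcs]
    have hne2 : revW (fun c => PySem.Chars.isalpha c) s.toList ≠ [] := by
      intro h
      apply hcs
      have hlen := length_mk2 (fun c => PySem.Chars.isalpha c) s.toList
        ((s.toList.filter (fun c => PySem.Chars.isalpha c)).reverse)
      rw [show mk2 (fun c => PySem.Chars.isalpha c) s.toList
          ((s.toList.filter (fun c => PySem.Chars.isalpha c)).reverse)
        = revW (fun c => PySem.Chars.isalpha c) s.toList from rfl, h] at hlen
      exact List.length_eq_zero_iff.mp (by simpa using hlen.symm)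
    rw [tpSwap_whole _ _ hne2]
    show String.ofList (revW (fun c => !PySem.Chars.isalpha c) (revW PySem.Chars.isalpha s.toList)) = _
    unfold revW
    rw [filter_neg_mk2 PySem.Chars.isalpha s.toList _ (by intro x hx; simp at hx; exact hx.2)]
    rw [mk2_mk2_eq_mtwo PySem.Chars.isalpha s.toList _ _ (by intro x hx; simp at hx; exact hx.2)]

-- ===== VERDICT (by name: the statement is the Claim_ definition above) =====
theorem reverseByType_spec : Claim_equal_reverseByType := by
  intro s _
  unfold Spec_reverseByType
  rw [portA_eq, portB_eq]
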